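-- pv_equiv track=rewrite | github.com/MonetDBSolutions/monet-ts | ingest/tsinfluxline/linereader.py | read_chunk_lines
-- ===== SOURCE A (Python) =====
-- from typing import List
--
-- def read_chunk_lines(input_lines: str, chunk_size: int) -> List[str]:
--     first_char = 0
--     last_char = 0
--     current_count = 0
--
--     for char in input_lines:
--         last_char += 1
--         if char == '\n':
--             current_count += 1
--             if current_count == chunk_size:
--                 yield input_lines[first_char:last_char]
--                 first_char = last_char
--                 current_count = 0
--
--     last_line = input_lines[first_char:last_char]
--     if last_line != '':
--         yield last_line
-- ===== SOURCE B (Python) =====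
-- def read_chunk_lines(input_lines, chunk_size):
--     # Split once into newline-separated pieces, then group the complete lines
--     # (all pieces but the last, which is the part after the final newline)
--     # into blocks of chunk_size and re-join each block.
--     pieces = input_lines.split('\n')
--     tail = pieces[-1]
--     pieces = pieces[:-1]
--     if chunk_size > 0:
--         while len(pieces) >= chunk_size:
--             yield ''.join(p + '\n' for p in pieces[:chunk_size])
--             pieces = pieces[chunk_size:]
--     rest = ''.join(p + '\n' for p in pieces) + tail
--     if rest:
--         yield rest
-- ===== Notes on version B (the rewrite author's own statement) =====
-- stated objective: faster
-- what changed: Replaces A's character-by-character scan that tracks slice indices and a newline counter by a staged split-then-group pass: split the string on newlines once, peel the final partial line off, then repeatedly take chunk_size complete lines from the piece list and re-join each block.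
import Mathlib
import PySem

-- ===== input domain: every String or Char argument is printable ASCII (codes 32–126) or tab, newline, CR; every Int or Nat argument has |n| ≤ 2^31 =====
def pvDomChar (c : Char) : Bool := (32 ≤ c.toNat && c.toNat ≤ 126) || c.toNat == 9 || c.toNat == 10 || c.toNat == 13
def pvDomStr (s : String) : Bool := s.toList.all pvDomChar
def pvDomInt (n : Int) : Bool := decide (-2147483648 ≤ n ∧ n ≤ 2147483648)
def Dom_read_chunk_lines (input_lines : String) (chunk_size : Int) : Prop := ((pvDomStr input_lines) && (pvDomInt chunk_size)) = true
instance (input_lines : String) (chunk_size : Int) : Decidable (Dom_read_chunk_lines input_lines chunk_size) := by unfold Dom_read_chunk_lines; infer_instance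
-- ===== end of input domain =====

-- B replaces A's single character-by-character scan (slice indices plus a newline counter)
-- by a staged split-then-group pass: split on '\n' once, peel off the final partial line,
-- then repeatedly take chunk_size complete lines off the piece list and re-join each block.

-- ===== PORT A =====
-- A's for-loop over the characters with state (first_char, last_char, current_count, yielded)
def pvA_loop (full : List Char) (cs : Int) :
    List Char → Int → Int → Int → List String → List String × Int × Int
  | [], first, last, _cnt, acc => (acc, first, last)
  | c :: rest, first, last, cnt, acc =>
    let last' := last + 1
    if c = '\n' then
      let cnt' := cnt + 1
      if cnt' = cs then
        pvA_loop full cs rest last' last' 0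
          (acc ++ [String.ofList (PySem.List.slice full (some first) (some last'))])
      else pvA_loop full cs rest first last' cnt' acc
    else pvA_loop full cs rest first last' cnt acc

-- A's code after the for-loop: yield input_lines[first_char:last_char] if non-empty
def pvA_finish (full : List Char) : List String × Int × Int → List String
  | (acc, first, last) =>
    let last_line := PySem.List.slice full (some first) (some last)
    if last_line ≠ [] then acc ++ [String.ofList last_line] else acc

def read_chunk_lines (input_lines : String) (chunk_size : Int) : List String :=
  pvA_finish input_lines.toList
    (pvA_loop input_lines.toList chunk_size input_lines.toList 0 0 0 [])

-- ===== PORT B =====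
-- ''.join(p + '\n' for p in ps)
def pvJoinNl (ps : List (List Char)) : List Char := (ps.map (fun p => p ++ ['\n'])).flatten

-- B's 'while len(pieces) >= chunk_size' loop; the fuel only makes it total
-- (each iteration removes chunk_size ≥ 1 pieces, so pieces.length + 1 iterations suffice).
def pvB_while (cs : Int) : Nat → List (List Char) → List String → List String × List (List Char)
  | 0, ps, acc => (acc, ps)
  | fuel + 1, ps, acc =>
    if cs ≤ (ps.length : Int) then
      pvB_while cs fuel (PySem.List.slice ps (some cs) none)
        (acc ++ [String.ofList (pvJoinNl (PySem.List.slice ps none (some cs)))])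
    else (acc, ps)

def read_chunk_lines_alt (input_lines : String) (chunk_size : Int) : List String :=
  let pieces0 := PySem.Chars.splitOn input_lines.toList ['\n']
  -- pieces[-1]: split never returns an empty list, so the .getD default is unreachable
  let tail := (PySem.List.pyGet? pieces0 (-1)).getD []
  let pieces := PySem.List.slice pieces0 none (some (-1))
  let r := if 0 < chunk_size then pvB_while chunk_size (pieces.length + 1) pieces [] else ([], pieces)
  let rest := pvJoinNl r.2 ++ tail
  if rest ≠ [] then r.1 ++ [String.ofList rest] else r.1

-- ===== PRECONDITION & SPEC =====
def Spec_read_chunk_lines (input_lines : String) (chunk_size : Int) (out : List String) : Prop := out = read_chunk_lines_alt input_lines chunk_size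
instance (input_lines : String) (chunk_size : Int) (out : List String) : Decidable (Spec_read_chunk_lines input_lines chunk_size out) := by unfold Spec_read_chunk_lines; infer_instance

-- ===== CLAIM (what is proved, stated in full; the proofs are below) =====
def Claim_equal_read_chunk_lines : Prop := ∀ (input_lines : String) (chunk_size : Int), Dom_read_chunk_lines input_lines chunk_size → Spec_read_chunk_lines input_lines chunk_size (read_chunk_lines input_lines chunk_size)

-- ===== LEMMAS AND PROOFS =====

-- structural single-char split on '\n' (proof-side model of input_lines.split('\n'))
def pvSplitNl : List Char → List (List Char)
  | [] => [[]]
  | c :: r =>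
    if c = '\n' then [] :: pvSplitNl r
    else
      match pvSplitNl r with
      | [] => [[c]]
      | q :: qs => (c :: q) :: qs

def pvConsHead (p : List Char) : List (List Char) → List (List Char)
  | [] => [p]
  | q :: qs => (p ++ q) :: qs

lemma pvSplitNl_ne_nil (l : List Char) : pvSplitNl l ≠ [] := by
  cases l with
  | nil => simp [pvSplitNl]
  | cons c r =>
    simp only [pvSplitNl]
    split_ifs
    · simp
    · rcases h : pvSplitNl r with _ | ⟨q, qs⟩ <;> simp

lemma pvJoinNl_nil : pvJoinNl [] = [] := rfl

lemma pvJoinNl_cons (p : List Char) (ps : List (List Char)) :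
    pvJoinNl (p :: ps) = p ++ '\n' :: pvJoinNl ps := by
  simp [pvJoinNl]

lemma pvJoinNl_append (a b : List (List Char)) :
    pvJoinNl (a ++ b) = pvJoinNl a ++ pvJoinNl b := by
  simp [pvJoinNl]

-- pvSplitNl decomposes l into newline-free pieces plus a newline-free tail
lemma pvSplitNl_recompose (l : List Char) :
    ∃ ps t, pvSplitNl l = ps ++ [t] ∧ pvJoinNl ps ++ t = l ∧
      (∀ p ∈ ps, '\n' ∉ p) ∧ '\n' ∉ t := by
  induction l with
  | nil => exact ⟨[], [], rfl, rfl, by simp, by simp⟩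
  | cons c r ih =>
    obtain ⟨ps, t, hsp, hrec, hfree, htf⟩ := ih
    by_cases hc : c = '\n'
    · subst hc
      refine ⟨[] :: ps, t, ?_, ?_, ?_, htf⟩
      · simp [pvSplitNl, hsp]
      · simp [pvJoinNl_cons, hrec]
      · intro p hp
        rcases List.mem_cons.mp hp with rfl | hp
        · simp
        · exact hfree p hp
    · cases ps with
      | nil =>
        have ht : t = r := by simpa [pvJoinNl_nil] using hrec
        refine ⟨[], c :: t, ?_, by simp [pvJoinNl_nil, ht], by simp, ?_⟩
        · simp only [pvSplitNl, if_neg hc, hsp, List.nil_append]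
        · simp only [List.mem_cons]
          rintro (h | h)
          · exact hc h.symm
          · exact htf h
      | cons q qs =>
        refine ⟨(c :: q) :: qs, t, ?_, ?_, ?_, htf⟩
        · simp only [pvSplitNl, if_neg hc, hsp, List.cons_append]
        · simp only [pvJoinNl_cons] at hrec ⊢
          simp only [List.cons_append, List.append_assoc] at hrec ⊢
          rw [hrec]
        · intro p hp
          rcases List.mem_cons.mp hp with rfl | hp
          · simp only [List.mem_cons]
            rintro (h | h)
            · exact hc h.symm
            · exact hfree q (by simp) h
          · exact hfree p (List.mem_cons_of_mem q hp)

-- the PySem split with fuel computes pvSplitNl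
lemma splitOn_go_eq (l : List Char) :
    ∀ fuel cur acc, l.length < fuel →
      PySem.Chars.splitOn.go ['\n'] fuel l cur acc =
        acc.reverse ++ pvConsHead cur.reverse (pvSplitNl l) := by
  induction l with
  | nil =>
    intro fuel cur acc hf
    obtain ⟨f, rfl⟩ : ∃ f, fuel = f + 1 := ⟨fuel - 1, by omega⟩
    simp [PySem.Chars.splitOn.go, pvSplitNl, pvConsHead]
  | cons c r ih =>
    intro fuel cur acc hf
    obtain ⟨f, rfl⟩ : ∃ f, fuel = f + 1 := ⟨fuel - 1, by omega⟩
    have hf' : r.length < f := by simp only [List.length_cons] at hf; omega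
    by_cases hc : c = '\n'
    · subst hc
      have hpre : List.isPrefixOf ['\n'] ('\n' :: r) = true := by
        simp [List.isPrefixOf]
      simp only [PySem.Chars.splitOn.go, hpre, if_pos, List.length_singleton,
        List.drop_succ_cons, List.drop_zero]
      rw [ih f [] ((cur.reverse) :: acc) hf']
      rcases h : pvSplitNl r with _ | ⟨q, qs⟩
      · exact absurd h (pvSplitNl_ne_nil r)
      · simp [pvSplitNl, pvConsHead, h]
    · have hpre : List.isPrefixOf ['\n'] (c :: r) = false := by
        simp [List.isPrefixOf]; intro h; exact absurd h.symm hc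
      simp only [PySem.Chars.splitOn.go, hpre, Bool.false_eq_true, if_false]
      rw [ih f (c :: cur) acc hf']
      rcases h : pvSplitNl r with _ | ⟨q, qs⟩
      · exact absurd h (pvSplitNl_ne_nil r)
      · simp [pvSplitNl, pvConsHead, h, if_neg hc]

lemma splitOn_eq (l : List Char) :
    PySem.Chars.splitOn l ['\n'] = pvSplitNl l := by
  rw [PySem.Chars.splitOn, splitOn_go_eq l (l.length + 1) [] [] (by omega)]
  rcases h : pvSplitNl l with _ | ⟨q, qs⟩
  · exact absurd h (pvSplitNl_ne_nil l)
  · simp [pvConsHead]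

-- A's loop walks straight through a newline-free block of characters
lemma pvA_skip (full : List Char) (cs : Int) (p : List Char) (hp : '\n' ∉ p) :
    ∀ rest first last cnt acc,
      pvA_loop full cs (p ++ rest) first last cnt acc =
        pvA_loop full cs rest first (last + p.length) cnt acc := by
  induction p with
  | nil => intro rest first last cnt acc; simp
  | cons c q ih =>
    intro rest first last cnt acc
    have hc : c ≠ '\n' := fun h => hp (by simp [h])
    have hq : '\n' ∉ q := fun h => hp (by simp [h])
    simp only [List.cons_append, pvA_loop, if_neg hc]
    rw [ih hq]
    rw [show last + 1 + (q.length : Int) = last + ((c :: q).length : Int) by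
      push_cast [List.length_cons]; ring]

-- piece-level model of A's loop (state: first, position, newline count, output)
def pvC (full : List Char) (cs : Int) :
    List (List Char) → Int → Nat → Int → List String → List String × Int
  | [], first, _k, _cnt, acc => (acc, first)
  | p :: rest, first, k, cnt, acc =>
    if cnt + 1 = cs then
      pvC full cs rest ((k + p.length + 1 : Nat) : Int) (k + p.length + 1) 0
        (acc ++ [String.ofList (PySem.List.slice full (some first)
          (some ((k + p.length + 1 : Nat) : Int)))])
    else pvC full cs rest first (k + p.length + 1) (cnt + 1) acc

-- A's character loop equals the piece-level recursion, and its final last is the end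
lemma pvA_eq_pvC (full : List Char) (cs : Int) (t : List Char) (ht : '\n' ∉ t) :
    ∀ ps, (∀ p ∈ ps, '\n' ∉ p) → ∀ first (k : Nat) cnt acc,
      pvA_loop full cs (pvJoinNl ps ++ t) first (k : Int) cnt acc =
        ((pvC full cs ps first k cnt acc).1, (pvC full cs ps first k cnt acc).2,
          ((k + (pvJoinNl ps).length + t.length : Nat) : Int)) := by
  intro ps
  induction ps with
  | nil =>
    intro _ first k cnt acc
    rw [pvJoinNl_nil, List.nil_append, ← List.append_nil t, pvA_skip full cs t ht]
    simp only [pvA_loop, pvC, Prod.mk.injEq, true_and]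
    simp only [List.length_nil, List.append_nil]
    push_cast; ring
  | cons p rest ih =>
    intro hfree first k cnt acc
    have hp : '\n' ∉ p := hfree p (by simp)
    have hrest : ∀ q ∈ rest, '\n' ∉ q := fun q hq => hfree q (by simp [hq])
    rw [pvJoinNl_cons, List.append_assoc, List.cons_append, pvA_skip full cs p hp]
    simp only [pvA_loop]
    have hcast : (k : Int) + p.length + 1 = ((k + p.length + 1 : Nat) : Int) := by
      push_cast; ring
    by_cases hcs : cnt + 1 = cs
    · simp only [if_pos hcs, hcast]
      rw [ih hrest]
      simp only [pvC, if_pos hcs]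
      simp only [List.length_append, List.length_cons]
      push_cast; ring_nf
    · simp only [if_neg hcs, hcast]
      rw [ih hrest]
      simp only [pvC, if_neg hcs]
      simp only [List.length_append, List.length_cons]
      push_cast; ring_nf

-- one-step unfolding equation for pvC on a cons (used to rewrite exactly once)
lemma pvC_cons (full : List Char) (cs : Int) (p : List Char) (rest : List (List Char))
    (first : Int) (k : Nat) (cnt : Int) (acc : List String) :
    pvC full cs (p :: rest) first k cnt acc =
      if cnt + 1 = cs then
        pvC full cs rest ((k + p.length + 1 : Nat) : Int) (k + p.length + 1) 0
          (acc ++ [String.ofList (PySem.List.slice full (some first)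
            (some ((k + p.length + 1 : Nat) : Int)))])
      else pvC full cs rest first (k + p.length + 1) (cnt + 1) acc := rfl

-- one full group of cs pieces starting at count 0 emits exactly one chunk
lemma pvC_group (full : List Char) (cs : Int) :
    ∀ ps1, ps1 ≠ [] → ∀ rest first (k : Nat) cnt acc, 0 ≤ cnt →
      cnt + (ps1.length : Int) = cs →
      pvC full cs (ps1 ++ rest) first k cnt acc =
        pvC full cs rest ((k + (pvJoinNl ps1).length : Nat) : Int)
          (k + (pvJoinNl ps1).length) 0
          (acc ++ [String.ofList (PySem.List.slice full (some first)
            (some ((k + (pvJoinNl ps1).length : Nat) : Int)))]) := by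
  intro ps1
  induction ps1 with
  | nil => intro h; exact absurd rfl h
  | cons p q ih =>
    intro _ rest first k cnt acc hcnt hlen
    cases q with
    | nil =>
      have hcs : cnt + 1 = cs := by simpa using hlen
      rw [List.cons_append, List.nil_append, pvC_cons, if_pos hcs]
      rw [show k + p.length + 1 = k + (pvJoinNl [p]).length by
        simp only [pvJoinNl_cons, pvJoinNl_nil, List.length_append,
          List.length_cons, List.length_nil]
        omega]
    | cons q0 qs =>
      have hcs : ¬ (cnt + 1 = cs) := by
        simp only [List.length_cons] at hlen
        push_cast at hlen
        omega
      rw [List.cons_append, pvC_cons, if_neg hcs]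
      rw [ih (by simp) rest first (k + p.length + 1) (cnt + 1) acc (by omega)
        (by simp only [List.length_cons] at hlen ⊢; push_cast at hlen ⊢; omega)]
      rw [show k + p.length + 1 + (pvJoinNl (q0 :: qs)).length
            = k + (pvJoinNl (p :: q0 :: qs)).length by
        simp only [pvJoinNl_cons, List.length_append, List.length_cons]
        omega]

-- fewer than cs pieces: no chunk is emitted
lemma pvC_small (full : List Char) (cs : Int) :
    ∀ ps first (k : Nat) cnt acc, 0 ≤ cnt → cnt + (ps.length : Int) < cs →
      pvC full cs ps first k cnt acc = (acc, first) := by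
  intro ps
  induction ps with
  | nil => intro first k cnt acc _ _; rfl
  | cons p q ih =>
    intro first k cnt acc hcnt hlen
    have hcs : ¬ (cnt + 1 = cs) := by
      simp only [List.length_cons] at hlen; push_cast at hlen; omega
    simp only [pvC, if_neg hcs]
    exact ih first (k + p.length + 1) (cnt + 1) acc (by omega)
      (by simp only [List.length_cons] at hlen; push_cast at hlen ⊢; omega)

-- chunk_size ≤ 0: A's counter never reaches it, no chunk is emitted
lemma pvC_nonpos (full : List Char) (cs : Int) (hcs : cs ≤ 0) :
    ∀ ps first (k : Nat) cnt acc, 0 ≤ cnt →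
      pvC full cs ps first k cnt acc = (acc, first) := by
  intro ps
  induction ps with
  | nil => intro first k cnt acc _; rfl
  | cons p q ih =>
    intro first k cnt acc hcnt
    have hne : ¬ (cnt + 1 = cs) := by omega
    simp only [pvC, if_neg hne]
    exact ih first (k + p.length + 1) (cnt + 1) acc (by omega)

-- the piece-level recursion, started at a chunk boundary, is B's grouping loop
lemma pvC_eq_pvB (full t : List Char) (cs : Int) (hcs : 0 < cs) :
    ∀ fuel ps (k : Nat) acc, ps.length < fuel →
      full.drop k = pvJoinNl ps ++ t →
      ∃ kf : Nat,
        pvC full cs ps (k : Int) k 0 acc =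
          ((pvB_while cs fuel ps acc).1, (kf : Int)) ∧
        full.drop kf = pvJoinNl (pvB_while cs fuel ps acc).2 ++ t := by
  intro fuel
  induction fuel with
  | zero => intro ps k acc h; omega
  | succ f ih =>
    intro ps k acc hfuel hdrop
    by_cases h : cs ≤ (ps.length : Int)
    · have hn1 : 1 ≤ cs.toNat := by omega
      have hnle : cs.toNat ≤ ps.length := by omega
      have htake : (ps.take cs.toNat).length = cs.toNat := by
        simp [hnle]
      have hsplit : ps = ps.take cs.toNat ++ ps.drop cs.toNat :=
        (List.take_append_drop _ _).symm
      have hgroup := pvC_group full cs (ps.take cs.toNat)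
        (by
          intro hnil
          rcases List.take_eq_nil_iff.mp hnil with h | h
          · omega
          · rw [h] at hnle; simp at hnle; omega)
        (ps.drop cs.toNat) ((k : Nat) : Int) k 0 acc le_rfl
        (by rw [htake]; omega)
      set L := (pvJoinNl (ps.take cs.toNat)).length with hL
      have hjoin : pvJoinNl ps = pvJoinNl (ps.take cs.toNat) ++ pvJoinNl (ps.drop cs.toNat) := by
        conv_lhs => rw [hsplit]
        exact pvJoinNl_append _ _
      have hdrop' : full.drop (k + L) = pvJoinNl (ps.drop cs.toNat) ++ t := by
        have : full.drop (k + L) = (full.drop k).drop L := by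
          rw [List.drop_drop]
        rw [this, hdrop, hjoin, List.append_assoc, List.drop_left' hL.symm]
      have hchunk : PySem.List.slice full (some (k : Int)) (some ((k + L : Nat) : Int))
          = pvJoinNl (ps.take cs.toNat) := by
        rw [PySem.List.slice_natCast, Nat.add_sub_cancel_left, hdrop, hjoin,
          List.append_assoc, List.take_left' hL.symm]
      obtain ⟨kf, hC, hD⟩ := ih (ps.drop cs.toNat) (k + L)
        (acc ++ [String.ofList (pvJoinNl (ps.take cs.toNat))])
        (by have := List.length_drop (l := ps) (i := cs.toNat); omega) hdrop'
      refine ⟨kf, ?_, ?_⟩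
      · conv_lhs => rw [hsplit]
        rw [hgroup, hchunk, hC]
        simp only [pvB_while, if_pos h,
          PySem.List.slice_from _ (le_of_lt hcs), PySem.List.slice_to _ (by omega : (0:Int) ≤ cs)]
      · rw [hD]
        simp only [pvB_while, if_pos h,
          PySem.List.slice_from _ (le_of_lt hcs), PySem.List.slice_to _ (by omega : (0:Int) ≤ cs)]
    · refine ⟨k, ?_, ?_⟩
      · rw [pvC_small full cs ps (k : Int) k 0 acc le_rfl (by omega)]
        simp [pvB_while, if_neg h]
      · simp only [pvB_while, if_neg h]
        exact hdrop

-- ===== VERDICT (by name: the statement is the Claim_ definition above) =====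
theorem read_chunk_lines_spec : Claim_equal_read_chunk_lines := by
  intro s cs _
  unfold Spec_read_chunk_lines read_chunk_lines read_chunk_lines_alt
  obtain ⟨ps, t, hsp, hrec, hfree, htf⟩ := pvSplitNl_recompose s.toList
  have hlen : s.toList.length = (pvJoinNl ps).length + t.length := by
    rw [← hrec]; simp
  have hpieces0 : PySem.Chars.splitOn s.toList ['\n'] = ps ++ [t] := by
    rw [splitOn_eq, hsp]
  have htail : (PySem.List.pyGet? (ps ++ [t]) (-1)).getD [] = t := by
    rw [PySem.List.pyGet?_neg_one_append_singleton]; rfl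
  have hinit : PySem.List.slice (ps ++ [t]) none (some (-1)) = ps := by
    rw [PySem.List.slice_to_neg_one, List.dropLast_concat]
  have hA := pvA_eq_pvC s.toList cs t htf ps hfree 0 0 0 []
  simp only [Nat.cast_zero] at hA
  rw [hrec] at hA
  simp only [hpieces0, htail, hinit]
  by_cases hcs : 0 < cs
  · obtain ⟨kf, hC, hD⟩ := pvC_eq_pvB s.toList t cs hcs (ps.length + 1) ps 0 []
      (by omega) (by simpa using hrec.symm)
    simp only [Nat.cast_zero] at hC
    rw [hA, hC]
    simp only [if_pos hcs]
    have hlast : PySem.List.slice s.toList (some (kf : Int))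
        (some ((0 + (pvJoinNl ps).length + t.length : Nat) : Int))
        = pvJoinNl (pvB_while cs (ps.length + 1) ps []).2 ++ t := by
      rw [show 0 + (pvJoinNl ps).length + t.length = s.toList.length by omega]
      rw [PySem.List.slice_natCast]
      rw [List.take_of_length_le (by simp)]
      exact hD
    simp only [pvA_finish, hlast]
  · have hC0 := pvC_nonpos s.toList cs (by omega) ps 0 0 0 [] le_rfl
    rw [hA, hC0]
    simp only [if_neg hcs]
    have hlast : PySem.List.slice s.toList (some (0 : Int))
        (some ((0 + (pvJoinNl ps).length + t.length : Nat) : Int)) = pvJoinNl ps ++ t := by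
      simp only [PySem.List.slice_zero_start]
      rw [PySem.List.slice_to _ (by positivity)]
      rw [List.take_of_length_le (by rw [Int.toNat_natCast]; omega)]
      exact hrec.symm
    simp only [pvA_finish, hlast, List.nil_append]
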